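-- pv_equiv track=rewrite | github.com/jkjan/PS | Programmers/대회/2.py | get_all_zzo
-- ===== SOURCE A (Python) =====
-- import heapq
--
-- def get_all_zzo(s):
--     arr = []
--     i = 0
--     while i < len(s):
--         # i 이후의 110
--         zzo = get_zzo(i, s)
--         if zzo is None:
--             # 해당 인덱스부터 110 시작 안 하면 다음 인덱스로
--             i += 1
--             continue
--         j, idx = zzo
--
--         # 110 우선순위 큐에 넣어줌
--         heapq.heappush(arr, (-j, idx))
--
--         # 110 다음 인덱스
--         i = i + j + 1
--     return arr
--
-- def get_zzo(from_, s):
--     # from 이후의 110을 찾음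
--     j = 0
--     while from_ + j < len(s) and s[from_ + j] != '0':
--         j += 1
--
--     # 110 찾음 (j는 1의 개수)
--     if 2 < j and from_ + j < len(s):
--         return j, from_ + j - 2
--     return None
-- ===== SOURCE B (Python) =====
-- import heapq
--
-- def get_all_zzo(s):
--     # Single left-to-right pass: track the start (anchor) of the current run of
--     # non-'0' characters; at each '0', push the run if longer than 2.
--     arr = []
--     anchor = 0
--     for p, c in enumerate(s):
--         if c == '0':
--             run = p - anchor
--             if run > 2:
--                 heapq.heappush(arr, (-run, p - 2))
--             anchor = p + 1
--     return arr
-- ===== Notes on version B (the rewrite author's own statement) =====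
-- stated objective: faster
-- what changed: Replaced the restart-from-next-index rescan (get_zzo recomputes the run length from every index) by a single left-to-right pass that tracks the anchor of the current run of non-zero characters and pushes at each zero character, in the same order.
import Mathlib
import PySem

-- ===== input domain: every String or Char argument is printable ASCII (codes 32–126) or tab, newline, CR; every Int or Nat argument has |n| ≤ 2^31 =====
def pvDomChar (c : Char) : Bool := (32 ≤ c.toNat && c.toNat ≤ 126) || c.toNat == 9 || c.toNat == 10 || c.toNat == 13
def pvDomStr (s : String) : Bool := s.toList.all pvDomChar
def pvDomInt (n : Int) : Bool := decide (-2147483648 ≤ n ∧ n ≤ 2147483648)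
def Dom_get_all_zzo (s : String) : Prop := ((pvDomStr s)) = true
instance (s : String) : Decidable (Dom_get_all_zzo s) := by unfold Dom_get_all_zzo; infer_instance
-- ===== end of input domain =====

-- B replaces A's quadratic restart-from-next-index rescan by one linear pass tracking
-- the start of the current non-'0' run; both push into the heap in the same order.

-- ===== PORT A =====
-- shared helper: heapq.heappush on a list of (Int × Int) tuples (Python tuple <)
-- Python heapq._siftdown: climb from pos to the root, moving parents down
def pvSiftdown (h : List (Int × Int)) (pos : Nat) (item : Int × Int) : List (Int × Int) :=
  if pos = 0 then h.set pos item
  else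
    let parent := (pos - 1) / 2
    let pv := h.getD parent (0, 0)
    if item.1 < pv.1 ∨ (item.1 = pv.1 ∧ item.2 < pv.2) then
      pvSiftdown (h.set pos pv) parent item
    else h.set pos item
termination_by pos
decreasing_by omega

def pvHeappush (h : List (Int × Int)) (item : Int × Int) : List (Int × Int) :=
  pvSiftdown (h ++ [item]) h.length item

-- inner while loop of get_zzo (j counter)
def get_zzo_j (from_ j : Nat) (cs : List Char) : Nat :=
  if from_ + j < cs.length ∧ cs.getD (from_ + j) ' ' ≠ '0' then
    get_zzo_j from_ (j + 1) cs
  else j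
termination_by cs.length - (from_ + j)
decreasing_by omega

def get_zzo (from_ : Nat) (cs : List Char) : Option (Nat × Nat) :=
  let j := get_zzo_j from_ 0 cs
  if 2 < j ∧ from_ + j < cs.length then some (j, from_ + j - 2) else none

def get_all_zzo_loop (cs : List Char) (i : Nat) (arr : List (Int × Int)) : List (Int × Int) :=
  if i < cs.length then
    match get_zzo i cs with
    | none => get_all_zzo_loop cs (i + 1) arr
    | some (j, idx) => get_all_zzo_loop cs (i + j + 1) (pvHeappush arr (-(j : Int), (idx : Int)))
  else arr
termination_by cs.length - i
decreasing_by all_goals omega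

def get_all_zzo (s : String) : List (Int × Int) :=
  get_all_zzo_loop s.toList 0 []

-- ===== PORT B =====
-- for p, c in enumerate(s): ported as structural recursion over the characters with
-- position counter p, run anchor a and the heap arr as loop state
def get_all_zzo_alt_loop : List Char → Nat → Nat → List (Int × Int) → List (Int × Int)
  | [], _, _, arr => arr
  | c :: rest, p, a, arr =>
    if c = '0' then
      get_all_zzo_alt_loop rest (p + 1) (p + 1)
        (if 2 < (p : Int) - (a : Int) then pvHeappush arr (-((p : Int) - (a : Int)), (p : Int) - 2) else arr)
    else get_all_zzo_alt_loop rest (p + 1) a arr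

def get_all_zzo_alt (s : String) : List (Int × Int) :=
  get_all_zzo_alt_loop s.toList 0 0 []

-- ===== PRECONDITION & SPEC =====
def Spec_get_all_zzo (s : String) (out : List (Int × Int)) : Prop := out = get_all_zzo_alt s
instance (s : String) (out : List (Int × Int)) : Decidable (Spec_get_all_zzo s out) := by unfold Spec_get_all_zzo; infer_instance

-- ===== CLAIM (what is proved, stated in full; the proofs are below) =====
def Claim_equal_get_all_zzo : Prop := ∀ (s : String), Dom_get_all_zzo s → Spec_get_all_zzo s (get_all_zzo s)

-- ===== LEMMAS AND PROOFS =====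

-- length of the run of non-'0' characters starting at p
def runFrom (cs : List Char) (p : Nat) : Nat :=
  if p < cs.length ∧ cs.getD p ' ' ≠ '0' then runFrom cs (p + 1) + 1 else 0
termination_by cs.length - p
decreasing_by omega

theorem getD_eq_getElem' (cs : List Char) (p : Nat) (hp : p < cs.length) :
    cs.getD p ' ' = cs[p] := List.getD_eq_getElem cs ' ' hp

theorem runFrom_succ (cs : List Char) (p : Nat) (h : p < cs.length)
    (hc : cs.getD p ' ' ≠ '0') : runFrom cs p = runFrom cs (p + 1) + 1 := by
  rw [runFrom, if_pos ⟨h, hc⟩]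

theorem runFrom_zero (cs : List Char) (p : Nat)
    (hc : ¬ (p < cs.length ∧ cs.getD p ' ' ≠ '0')) : runFrom cs p = 0 := by
  rw [runFrom, if_neg hc]

theorem get_zzo_j_eq (cs : List Char) : ∀ n from_ j, cs.length - (from_ + j) ≤ n →
    get_zzo_j from_ j cs = j + runFrom cs (from_ + j) := by
  intro n
  induction n with
  | zero =>
    intro from_ j h
    have hc : ¬ (from_ + j < cs.length ∧ cs.getD (from_ + j) ' ' ≠ '0') := by
      intro hh; omega
    rw [get_zzo_j, if_neg hc, runFrom_zero cs _ hc]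
    omega
  | succ n ih =>
    intro from_ j h
    by_cases hc : from_ + j < cs.length ∧ cs.getD (from_ + j) ' ' ≠ '0'
    · rw [get_zzo_j, if_pos hc, runFrom, if_pos hc]
      rw [ih from_ (j + 1) (by omega)]
      rw [show from_ + (j + 1) = from_ + j + 1 by omega]
      omega
    · rw [get_zzo_j, if_neg hc, runFrom_zero cs _ hc]
      omega

-- every character strictly inside the run starting at p is a non-'0' in range
theorem runFrom_mem (cs : List Char) : ∀ k p, k < runFrom cs p →
    p + k < cs.length ∧ cs.getD (p + k) ' ' ≠ '0' := by
  intro k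
  induction k with
  | zero =>
    intro p h
    by_cases hc : p < cs.length ∧ cs.getD p ' ' ≠ '0'
    · simpa using hc
    · rw [runFrom_zero cs p hc] at h; omega
  | succ k ih =>
    intro p h
    by_cases hc : p < cs.length ∧ cs.getD p ' ' ≠ '0'
    · rw [runFrom_succ cs p hc.1 hc.2] at h
      have := ih (p + 1) (by omega)
      rw [show p + (k + 1) = p + 1 + k by omega]
      exact this
    · rw [runFrom_zero cs p hc] at h; omega

-- the character just past the run is '0' (when it exists)
theorem runFrom_stop (cs : List Char) : ∀ n p, cs.length - p ≤ n →
    p + runFrom cs p < cs.length → cs.getD (p + runFrom cs p) ' ' = '0' := by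
  intro n
  induction n with
  | zero =>
    intro p h hlt
    have h0 : runFrom cs p = 0 := runFrom_zero cs p (by intro hh; omega)
    rw [h0] at hlt; omega
  | succ n ih =>
    intro p h hlt
    by_cases hc : p < cs.length ∧ cs.getD p ' ' ≠ '0'
    · have hr : runFrom cs p = runFrom cs (p + 1) + 1 := runFrom_succ cs p hc.1 hc.2
      rw [hr] at hlt ⊢
      rw [show p + (runFrom cs (p + 1) + 1) = (p + 1) + runFrom cs (p + 1) by omega] at hlt ⊢
      exact ih (p + 1) (by omega) hlt
    · have h0 : runFrom cs p = 0 := runFrom_zero cs p hc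
      rw [h0] at hlt ⊢
      simp only [Nat.add_zero] at hlt ⊢
      by_contra hne
      exact hc ⟨hlt, hne⟩

-- characterisation of the first '0' in cs.drop p via runFrom
theorem findIdx_drop (cs : List Char) : ∀ n p, cs.length - p ≤ n →
    (cs.drop p).findIdx? (fun c => c = '0') =
      if p + runFrom cs p < cs.length then some (runFrom cs p) else none := by
  intro n
  induction n with
  | zero =>
    intro p h
    rw [List.drop_eq_nil_of_le (by omega), runFrom_zero cs p (by intro hh; omega)]
    rw [if_neg (show ¬ (p + 0 < cs.length) by omega)]
    simp
  | succ n ih =>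
    intro p h
    by_cases hp : p < cs.length
    · have hd : cs.drop p = cs[p] :: cs.drop (p + 1) := (List.getElem_cons_drop hp).symm
      rw [hd, List.findIdx?_cons]
      by_cases hc : cs[p] = '0'
      · have h0 : runFrom cs p = 0 :=
          runFrom_zero cs p (by
            intro ⟨_, hne⟩
            exact hne (by rw [getD_eq_getElem' cs p hp]; exact hc))
        rw [h0]
        simp [hc, hp]
      · have hgd : cs.getD p ' ' ≠ '0' := by
          rw [getD_eq_getElem' cs p hp]; exact hc
        have hr : runFrom cs p = runFrom cs (p + 1) + 1 := runFrom_succ cs p hp hgd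
        have hcb : (cs[p] = '0') = False := by simp [hc]
        simp only [hcb, decide_false]
        rw [ih (p + 1) (by omega), hr]
        by_cases hlt : p + 1 + runFrom cs (p + 1) < cs.length
        · rw [if_pos hlt, if_pos (show p + (runFrom cs (p + 1) + 1) < cs.length by omega)]
          simp
        · rw [if_neg hlt, if_neg (show ¬ (p + (runFrom cs (p + 1) + 1) < cs.length) by omega)]
          simp
    · rw [List.drop_eq_nil_of_le (by omega), runFrom_zero cs p (by intro hh; omega)]
      rw [if_neg (show ¬ (p + 0 < cs.length) by omega)]
      simp

-- the anchor is irrelevant while the next '0' is at most 2 past both anchors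
theorem anchor_irrel : ∀ (l : List Char) (p a a' : Nat) (arr : List (Int × Int)),
    (match l.findIdx? (fun c => c = '0') with
     | none => True
     | some q => ((p + q : Nat) : Int) - (a : Int) ≤ 2 ∧ ((p + q : Nat) : Int) - (a' : Int) ≤ 2) →
    get_all_zzo_alt_loop l p a arr = get_all_zzo_alt_loop l p a' arr := by
  intro l
  induction l with
  | nil => intro p a a' arr _; rfl
  | cons c rest ih =>
    intro p a a' arr h
    by_cases hc : c = '0'
    · rw [List.findIdx?_cons] at h
      simp only [hc, decide_true] at h
      obtain ⟨h1, h2⟩ := h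
      rw [get_all_zzo_alt_loop, get_all_zzo_alt_loop]
      simp only [hc, if_pos]
      rw [if_neg (by push_cast at h1 ⊢; omega), if_neg (by push_cast at h2 ⊢; omega)]
    · rw [get_all_zzo_alt_loop, get_all_zzo_alt_loop, if_neg hc, if_neg hc]
      apply ih
      rw [List.findIdx?_cons] at h
      have hcb : (c = '0') = False := by simp [hc]
      simp only [hcb, decide_false] at h
      cases hq : rest.findIdx? (fun c => c = '0') with
      | none => trivial
      | some q =>
        rw [hq] at h; simp only [Option.map_some] at h
        obtain ⟨h1, h2⟩ := h
        exact ⟨by push_cast at h1 ⊢; omega, by push_cast at h2 ⊢; omega⟩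

-- B's loop skips a block of non-'0' characters without touching the state
theorem skip_run (cs : List Char) : ∀ m p a arr,
    (∀ k, k < m → p + k < cs.length ∧ cs.getD (p + k) ' ' ≠ '0') →
    get_all_zzo_alt_loop (cs.drop p) p a arr = get_all_zzo_alt_loop (cs.drop (p + m)) (p + m) a arr := by
  intro m
  induction m with
  | zero => intro p a arr _; rfl
  | succ m ih =>
    intro p a arr h
    have h0 := h 0 (by omega)
    have hp : p < cs.length := by simpa using h0.1
    have hd : cs.drop p = cs[p] :: cs.drop (p + 1) := (List.getElem_cons_drop hp).symm
    have hc : ¬ (cs[p] = '0') := by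
      have h2 := h0.2
      rw [show p + 0 = p by omega, getD_eq_getElem' cs p hp] at h2
      exact h2
    rw [hd, get_all_zzo_alt_loop, if_neg hc]
    have := ih (p + 1) a arr (fun k hk => by
      have hkk := h (k + 1) (by omega)
      rw [show p + (k + 1) = p + 1 + k by omega] at hkk
      exact hkk)
    rw [this, show p + 1 + m = p + (m + 1) by omega]

-- main correspondence: A's loop from i equals B's loop on the suffix with anchor i
theorem main_lemma (cs : List Char) : ∀ n i arr, cs.length - i ≤ n →
    get_all_zzo_loop cs i arr = get_all_zzo_alt_loop (cs.drop i) i i arr := by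
  intro n
  induction n with
  | zero =>
    intro i arr h
    rw [get_all_zzo_loop, if_neg (by omega), List.drop_eq_nil_of_le (by omega)]
    rfl
  | succ n ih =>
    intro i arr h
    by_cases hi : i < cs.length
    · rw [get_all_zzo_loop, if_pos hi]
      have hj : get_zzo_j i 0 cs = runFrom cs i := by
        simpa using get_zzo_j_eq cs (cs.length - i) i 0 (by omega)
      rw [get_zzo]
      simp only [hj]
      by_cases hz : 2 < runFrom cs i ∧ i + runFrom cs i < cs.length
      · -- push case: the full run [i, i+j) followed by a '0' at i+j
        set j := runFrom cs i with hjdef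
        rw [if_pos hz]
        simp only
        rw [ih (i + j + 1) _ (by omega)]
        rw [skip_run cs j i i arr (fun k hk => runFrom_mem cs k i (by omega))]
        have hstop : cs.getD (i + j) ' ' = '0' :=
          runFrom_stop cs (cs.length - i) i (by omega) hz.2
        have hd : cs.drop (i + j) = cs[i + j] :: cs.drop (i + j + 1) :=
          (List.getElem_cons_drop hz.2).symm
        have hc0 : cs[i + j] = '0' := by
          rw [getD_eq_getElem' cs _ hz.2] at hstop; exact hstop
        rw [hd, get_all_zzo_alt_loop, if_pos hc0]
        rw [if_pos (by push_cast; omega : (2 : Int) < ((i + j : Nat) : Int) - (i : Nat))]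
        have hpair : (-(j : Int), ((i + j - 2 : Nat) : Int)) =
            (-(((i + j : Nat) : Int) - ((i : Nat) : Int)), ((i + j : Nat) : Int) - 2) := by
          rw [Prod.mk.injEq]
          constructor <;> omega
        rw [hpair]
      · -- no push: A advances by one index
        rw [if_neg hz]
        simp only
        rw [ih (i + 1) arr (by omega)]
        have hd : cs.drop i = cs[i] :: cs.drop (i + 1) := (List.getElem_cons_drop hi).symm
        by_cases hc : cs[i] = '0'
        · -- at a '0': both recurse with anchor i+1
          rw [hd, get_all_zzo_alt_loop, if_pos hc]
          rw [if_neg (by omega : ¬ ((2 : Int) < ((i : Nat) : Int) - (i : Nat)))]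
        · -- inside a short (or unterminated) run: anchor does not matter
          have hgd : cs.getD i ' ' ≠ '0' := by
            rw [getD_eq_getElem' cs i hi]; exact hc
          have hr : runFrom cs i = runFrom cs (i + 1) + 1 := runFrom_succ cs i hi hgd
          rw [hd, get_all_zzo_alt_loop, if_neg hc]
          apply anchor_irrel
          rw [findIdx_drop cs (cs.length - (i + 1)) (i + 1) (by omega)]
          by_cases hlt : i + 1 + runFrom cs (i + 1) < cs.length
          · rw [if_pos hlt]
            simp only
            constructor <;> push_cast <;> omega
          · rw [if_neg hlt]
            trivial
    · rw [get_all_zzo_loop, if_neg hi, List.drop_eq_nil_of_le (by omega)]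
      rfl

-- ===== VERDICT (by name: the statement is the Claim_ definition above) =====
theorem get_all_zzo_spec : Claim_equal_get_all_zzo := by
  intro s _
  unfold Spec_get_all_zzo get_all_zzo get_all_zzo_alt
  simpa using main_lemma s.toList s.toList.length 0 [] (by omega)
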